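-- pv_equiv track=rewrite | github.com/TragicMayhem/advent_of_code | aoc_2021/day18/aoc2021d18 skelton WIP.py | check_for_split
-- ===== SOURCE A (Python) =====
-- def check_for_split(input):
--
--     count_depth = 0
--
--     for i in range(len(input)):
--
--         if input[i] == '[':
--             count_depth += 1
--         elif input[i] == ']':
--             count_depth -=1
--
--         if count_depth > 4:
--             return i  # return the position of the depth 4 pair
--
--     return 0  # return start of string because nothing depth of 4
-- ===== SOURCE B (Python) =====
-- def check_for_split(input):
--     # Phase 1: build the running-depth table.
--     depth = 0
--     depths = []
--     for c in input:
--         depth += 1 if c == '[' else -1 if c == ']' else 0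
--         depths.append(depth)
--     # Phase 2: find the first index whose depth exceeds 4.
--     for i, d in enumerate(depths):
--         if d > 4:
--             return i
--     return 0
-- ===== Notes on version B (the rewrite author's own statement) =====
-- stated objective: alternative
-- what changed: Replaces A's fused track-and-test loop with two phases: first build the full running-depth table, then a separate enumerate scan for the first depth exceeding 4.
import Mathlib
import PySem

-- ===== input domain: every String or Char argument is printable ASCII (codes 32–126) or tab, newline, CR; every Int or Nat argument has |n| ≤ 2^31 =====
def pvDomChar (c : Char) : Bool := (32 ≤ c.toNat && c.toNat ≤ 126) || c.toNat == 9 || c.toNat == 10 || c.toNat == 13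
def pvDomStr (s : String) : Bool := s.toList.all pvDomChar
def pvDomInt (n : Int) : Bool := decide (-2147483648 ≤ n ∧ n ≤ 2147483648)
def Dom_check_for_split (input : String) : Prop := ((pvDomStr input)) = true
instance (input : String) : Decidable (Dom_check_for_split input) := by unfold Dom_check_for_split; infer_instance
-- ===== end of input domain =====

-- B builds the full running-depth table first, then scans it separately for the first depth > 4 (alternative decomposition, same cost).

-- ===== PORT A =====
-- the for-loop over range(len(input)) with early return: index i and count_depth carried through
def chA : List Char → Int → Int → Int
  | [], _, _ => 0
  | c :: rest, i, d =>
    let d' := if c = '[' then d + 1 else if c = ']' then d - 1 else d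
    if d' > 4 then i else chA rest (i + 1) d'

def check_for_split (input : String) : Int := chA input.toList 0 0

-- ===== PORT B =====
-- phase 1: the running-depth table (depths.append(depth) loop)
def depthsB : List Char → Int → List Int
  | [], _ => []
  | c :: rest, d =>
    let d' := d + (if c = '[' then 1 else if c = ']' then -1 else 0)
    d' :: depthsB rest d'

-- phase 2: first index with depth > 4, else 0 (the enumerate scan)
def findB : List Int → Int → Int
  | [], _ => 0
  | d :: rest, i => if d > 4 then i else findB rest (i + 1)

def check_for_split_alt (input : String) : Int := findB (depthsB input.toList 0) 0

-- ===== PRECONDITION & SPEC =====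
def Spec_check_for_split (input : String) (out : Int) : Prop := out = check_for_split_alt input
instance (input : String) (out : Int) : Decidable (Spec_check_for_split input out) := by unfold Spec_check_for_split; infer_instance

-- ===== CLAIM (what is proved, stated in full; the proofs are below) =====
def Claim_equal_check_for_split : Prop := ∀ (input : String), Dom_check_for_split input → Spec_check_for_split input (check_for_split input)

-- ===== LEMMAS AND PROOFS =====

-- ===== VERDICT (by name: the statement is the Claim_ definition above) =====
theorem chA_eq_findB (l : List Char) (i d : Int) :
    chA l i d = findB (depthsB l d) i := by
  induction l generalizing i d with
  | nil => rfl
  | cons c rest ih =>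
    simp only [chA, depthsB, findB]
    by_cases h1 : c = '['
    · simp [h1, ih]
    · by_cases h2 : c = ']'
      · simp [h1, h2, ih]
        rw [show d + -1 = d - 1 from by ring]
        by_cases h : 5 < d
        · simp [h, show (4:Int) < d - 1 from by omega]
        · simp [h, show ¬((4:Int) < d - 1) from by omega]
      · simp [h1, h2, ih]

theorem check_for_split_spec : Claim_equal_check_for_split := by
  intro input _
  show check_for_split input = check_for_split_alt input
  simp [check_for_split, check_for_split_alt, chA_eq_findB]
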